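-- pv_equiv track=rewrite | github.com/Adam-Hoelscher/CodeFights.py | chessQueen.py | chessQueen
-- ===== SOURCE A (Python) =====
-- from itertools import product
--
-- def chessQueen(q):
--
--     files = 'abcdefgh'
--
--     q_file = files.find(q[0])
--     q_rank = int(q[-1]) - 1
--
--     safe_locs = set(product(range(8), range(8)))
--
--     for file in range(8):
--         file_diff = q_file - file
--         if not file_diff:
--             for rank in range(8):
--                 safe_locs.discard((file, rank))
--         else:
--             for direction in range(-1, 2):
--                 threatened_rank = q_rank + file_diff * direction
--                 safe_locs.discard((file, threatened_rank))
--
--     safe = [f'{files[f]}{r+1}' for f, r in safe_locs]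
--     return sorted(safe)
-- ===== SOURCE B (Python) =====
-- def chessQueen(q):
--     files = 'abcdefgh'
--     q_file = files.find(q[0])
--     q_rank = int(q[-1]) - 1
--     return [files[f] + str(r + 1)
--             for f in range(8) for r in range(8)
--             if f != q_file and r != q_rank and abs(f - q_file) != abs(r - q_rank)]
-- ===== Notes on version B (the rewrite author's own statement) =====
-- stated objective: simpler
-- what changed: A builds the set of all 64 squares and walks files and ray directions discarding threatened squares, then sorts the survivors; B makes a single pass over all squares in order, keeping a square iff the queen-attack predicate (same file, same rank, or equal coordinate differences) fails, so no set, no subtraction and no final sort is needed.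
import Mathlib
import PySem

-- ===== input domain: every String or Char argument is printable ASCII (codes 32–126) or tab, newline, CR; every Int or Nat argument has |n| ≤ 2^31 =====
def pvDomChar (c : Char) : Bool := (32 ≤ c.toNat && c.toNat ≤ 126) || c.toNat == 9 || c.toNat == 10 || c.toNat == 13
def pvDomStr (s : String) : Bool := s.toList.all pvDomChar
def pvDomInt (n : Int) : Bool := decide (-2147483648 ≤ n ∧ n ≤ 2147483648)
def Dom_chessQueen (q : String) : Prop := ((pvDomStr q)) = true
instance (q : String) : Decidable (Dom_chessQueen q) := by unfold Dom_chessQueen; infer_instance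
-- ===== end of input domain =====

-- B replaces A's "start from all 64 squares, loop over files×directions and subtract the
-- threatened squares from a set, then sort" by one direct filtering pass over all squares
-- with the queen-attack predicate, emitted already in sorted order (simpler).


-- ===== PORT A =====
-- f'{files[f]}{r+1}', the square name A builds, as a char list (f is always 0..7 here)
def pvSquareA (f r : Int) : List Char :=
  match PySem.List.pyGet? "abcdefgh".toList f with
  | some c => c :: PySem.Int.toChars (r + 1)
  | none => []
-- the body of A after the two parsing lines, as a function of q_file and q_rank
def chessQueenCoreA (qf qr : Int) : List String :=
  let safe0 : PySem.Set (Int × Int) :=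
    PySem.Set.ofList ((PySem.List.pyRange 0 8 1).flatMap fun f =>
      (PySem.List.pyRange 0 8 1).map fun r => (f, r))
  let safe := (PySem.List.pyRange 0 8 1).foldl (fun s file =>
      let fd := qf - file
      if fd = 0 then
        (PySem.List.pyRange 0 8 1).foldl (fun s rank => PySem.Set.discard s (file, rank)) s
      else
        (PySem.List.pyRange (-1) 2 1).foldl (fun s dir => PySem.Set.discard s (file, qr + fd * dir)) s)
    safe0
  (PySem.List.sorted (safe.map fun p => pvSquareA p.1 p.2) (fun x => x) false).map String.ofList

def chessQueen (q : String) : List String :=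
  match PySem.Str.pyGet? q 0, PySem.Str.pyGet? q (-1) with
  | some c0, some cl =>
    match PySem.Int.ofStr? (String.ofList [cl]) with
    | some n => chessQueenCoreA (PySem.Str.find "abcdefgh" (String.ofList [c0])) (n - 1)
    | none => []   -- int(q[-1]) raises ValueError: outside Pre_
  | _, _ => []     -- empty q: IndexError, outside Pre_

-- ===== PORT B =====
-- the same square string, as B writes it
def pvSquareB (f r : Int) : List Char :=
  (PySem.List.pyGet? "abcdefgh".toList f).elim [] fun c => c :: PySem.Int.toChars (r + 1)
-- B's comprehension: keep a square iff it is not attacked by the queen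
def chessQueenCoreB (qf qr : Int) : List String :=
  (PySem.List.pyRange 0 8 1).flatMap fun f =>
    ((PySem.List.pyRange 0 8 1).filter fun r =>
        decide (f ≠ qf) && decide (r ≠ qr) && decide (|f - qf| ≠ |r - qr|)).map
      fun r => String.ofList (pvSquareB f r)

def chessQueen_alt (q : String) : List String :=
  match PySem.Str.pyGet? q 0 with
  | none => []
  | some c0 =>
    match PySem.Str.pyGet? q (-1) with
    | none => []
    | some cl =>
      match PySem.Int.ofStr? (String.ofList [cl]) with
      | none => []
      | some n => chessQueenCoreB (PySem.Str.find "abcdefgh" (String.ofList [c0])) (n - 1)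

-- ===== PRECONDITION & SPEC =====
-- Pre_ excludes exactly the inputs where A raises: an empty q (IndexError on q[0]) and a
-- last character that is not a decimal digit (ValueError in int(q[-1])).
def Pre_chessQueen (q : String) : Prop :=
  q.toList ≠ [] ∧ q.toList.getLastD ' ' ∈ ['0','1','2','3','4','5','6','7','8','9']
instance (q : String) : Decidable (Pre_chessQueen q) := by unfold Pre_chessQueen; infer_instance

def pvWitness_chessQueen : String := "d4"

def Spec_chessQueen (q : String) (out : List String) : Prop := out = chessQueen_alt q
instance (q : String) (out : List String) : Decidable (Spec_chessQueen q out) := by unfold Spec_chessQueen; infer_instance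

-- ===== CLAIM (what is proved, stated in full; the proofs are below) =====
def Claim_equal_chessQueen : Prop := ∀ (q : String), Dom_chessQueen q → Pre_chessQueen q → Spec_chessQueen q (chessQueen q)

-- ===== LEMMAS AND PROOFS =====

-- all 64 squares, in A's product order (also the order of B's two comprehension loops)
def pvProd64 : List (Int × Int) :=
  (PySem.List.pyRange 0 8 1).flatMap fun f => (PySem.List.pyRange 0 8 1).map fun r => (f, r)

-- the Bool predicate one iteration of A's outer loop leaves true (what it does NOT discard)
def pvKeep (qf qr file : Int) (x : Int × Int) : Bool :=
  if qf - file = 0 then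
    (PySem.List.pyRange 0 8 1).all fun rank => !(x == (file, rank))
  else
    (PySem.List.pyRange (-1) 2 1).all fun dir => !(x == (file, qr + (qf - file) * dir))

-- B's keep predicate, on a pair
def pvKeepB (qf qr : Int) (x : Int × Int) : Bool :=
  decide (x.1 ≠ qf) && decide (x.2 ≠ qr) && decide (|x.1 - qf| ≠ |x.2 - qr|)

theorem pv_nodup64 : pvProd64.Nodup := by decide

-- '<' on List Char (code-point lexicographic, = Python's str '<') is asymmetric
theorem pv_listchar_asymm (a b : List Char) (h : a < b) : ¬ b < a := fun h2 =>
  Std.Asymm.asymm _ _ ((List.lt_iff_lex_lt a b).mp h) ((List.lt_iff_lex_lt b a).mp h2)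

-- insertion sort with the identity key leaves a strictly increasing list unchanged
theorem pv_sorted_id (xs : List (List Char)) (h : xs.Pairwise (· < ·)) :
    PySem.List.sorted xs (fun x => x) = xs := by
  rw [PySem.List.sorted_eq_foldl_insertBy]
  suffices H : ∀ (ys pre : List (List Char)), (pre ++ ys).Pairwise (· < ·) →
      ys.foldl (fun acc x => PySem.List.insertBy (fun a b => decide (a < b)) x acc) pre = pre ++ ys by
    simpa using H xs [] (by simpa using h)
  intro ys
  induction ys with
  | nil => simp
  | cons x t ih =>
      intro pre hp
      rw [List.foldl_cons, PySem.List.insertBy_of_forall_not_before _ _ _ ?hb]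
      · have := ih (pre ++ [x]) (by simpa using hp)
        simpa using this
      case hb =>
        intro y hy
        have hyx : y < x := (List.pairwise_append.mp hp).2.2 y hy x (List.mem_cons_self)
        simpa using pv_listchar_asymm y x hyx

set_option maxRecDepth 40000 in
theorem pv_pw64 : (pvProd64.map fun p => pvSquareA p.1 p.2).Pairwise (· < ·) :=
  List.isChain_iff_pairwise.mp (by decide)

-- discarding every h b for b in l is one filter
theorem pv_foldl_discard {α β : Type} [BEq α] (l : List β) (h : β → α) (s : List α) :
    l.foldl (fun s b => PySem.Set.discard s (h b)) s
      = s.filter (fun x => l.all fun b => !(x == h b)) := by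
  induction l generalizing s with
  | nil => simp
  | cons b t ih =>
      simp only [List.foldl_cons, ih, List.all_cons]
      show (PySem.Set.discard s (h b)).filter _ = _
      unfold PySem.Set.discard
      rw [List.filter_filter]
      exact List.filter_congr fun x _ => by rw [Bool.and_comm]

-- a fold of filter-like steps is one filter
theorem pv_foldl_filter {α β : Type} (l : List β) (F : List α → β → List α) (p : β → α → Bool)
    (hF : ∀ s b, F s b = s.filter (p b)) (s : List α) :
    l.foldl F s = s.filter (fun x => l.all fun b => p b x) := by
  induction l generalizing s with
  | nil => simp
  | cons b t ih =>
      rw [List.foldl_cons, hF, ih, List.filter_filter]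
      exact List.filter_congr fun x _ => by rw [List.all_cons, Bool.and_comm]

-- A's whole loop nest is one filter of the 64-square list by pvKeep over all files
theorem pv_loop_eq_filter (qf qr : Int) :
    (PySem.List.pyRange 0 8 1).foldl (fun s file =>
        let fd := qf - file
        if fd = 0 then
          (PySem.List.pyRange 0 8 1).foldl (fun s rank => PySem.Set.discard s (file, rank)) s
        else
          (PySem.List.pyRange (-1) 2 1).foldl (fun s dir => PySem.Set.discard s (file, qr + fd * dir)) s)
      (PySem.Set.ofList pvProd64)
    = pvProd64.filter fun x => (PySem.List.pyRange 0 8 1).all fun file => pvKeep qf qr file x := by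
  rw [show PySem.Set.ofList pvProd64 = pvProd64 from
    PySem.Set.ofList_eq_self_of_nodup pvProd64 pv_nodup64]
  refine pv_foldl_filter _ _ _ (fun s file => ?_) _
  show (if qf - file = 0 then _ else _) = _
  unfold pvKeep
  by_cases h : qf - file = 0 <;>
    simp only [h, if_true, if_false, pv_foldl_discard]

-- on the 64 squares, surviving every iteration of A's loop ↔ B keeps the square
theorem pv_pred_iff (qf qr f r : Int) (hf0 : 0 ≤ f) (hf8 : f < 8) (hr0 : 0 ≤ r) (hr8 : r < 8) :
    ((PySem.List.pyRange 0 8 1).all fun file => pvKeep qf qr file (f, r)) = true ↔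
    ((f ≠ qf ∧ r ≠ qr) ∧ |f - qf| ≠ |r - qr|) := by
  simp only [List.all_eq_true, PySem.List.mem_pyRange_one, pvKeep]
  constructor
  · intro h
    have hself := h f ⟨hf0, hf8⟩
    by_cases hq : qf - f = 0
    · rw [if_pos hq] at hself
      simp only [List.all_eq_true, PySem.List.mem_pyRange_one, Bool.not_eq_eq_eq_not,
        Bool.not_true, beq_eq_false_iff_ne, ne_eq, Prod.mk.injEq, not_and] at hself
      exact absurd rfl (hself r ⟨hr0, hr8⟩ trivial)
    · rw [if_neg hq] at hself
      simp only [List.all_eq_true, PySem.List.mem_pyRange_one, Bool.not_eq_eq_eq_not,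
        Bool.not_true, beq_eq_false_iff_ne, ne_eq, Prod.mk.injEq, not_and] at hself
      have h0 := hself 0 (by norm_num)
      have h1 := hself 1 (by norm_num)
      have hm := hself (-1) (by norm_num)
      refine ⟨⟨by omega, fun hrq => h0 trivial (by omega)⟩, fun habs => ?_⟩
      rcases abs_eq_abs.mp habs with he | he
      · exact hm trivial (by omega)
      · exact h1 trivial (by omega)
  · rintro ⟨⟨h1, h2⟩, h3⟩ file _
    have h3' : ¬(f - qf = r - qr ∨ f - qf = -(r - qr)) := fun hc => h3 (abs_eq_abs.mpr hc)
    by_cases hq : qf - file = 0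
    · rw [if_pos hq]
      simp only [List.all_eq_true, PySem.List.mem_pyRange_one, Bool.not_eq_eq_eq_not,
        Bool.not_true, beq_eq_false_iff_ne, ne_eq, Prod.mk.injEq, not_and]
      intro rank _ hff
      omega
    · rw [if_neg hq]
      simp only [List.all_eq_true, PySem.List.mem_pyRange_one, Bool.not_eq_eq_eq_not,
        Bool.not_true, beq_eq_false_iff_ne, ne_eq, Prod.mk.injEq, not_and]
      intro dir hdir hff
      have hd : dir = -1 ∨ dir = 0 ∨ dir = 1 := by omega
      subst hff
      rcases hd with h | h | h <;> subst h <;> omega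

theorem pv_pred_eq (qf qr f r : Int) (hf0 : 0 ≤ f) (hf8 : f < 8) (hr0 : 0 ≤ r) (hr8 : r < 8) :
    ((PySem.List.pyRange 0 8 1).all fun file => pvKeep qf qr file (f, r))
      = pvKeepB qf qr (f, r) := by
  rw [Bool.eq_iff_iff, pv_pred_iff qf qr f r hf0 hf8 hr0 hr8]
  simp [pvKeepB, and_assoc]

-- the two cores agree for every q_file and q_rank
theorem pv_core_eq (qf qr : Int) : chessQueenCoreA qf qr = chessQueenCoreB qf qr := by
  unfold chessQueenCoreA
  dsimp only
  rw [show ((PySem.List.pyRange 0 8 1).flatMap fun f =>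
      (PySem.List.pyRange 0 8 1).map fun r => ((f : Int), (r : Int))) = pvProd64 from rfl]
  rw [pv_loop_eq_filter qf qr]
  have hfc : (pvProd64.filter fun x => (PySem.List.pyRange 0 8 1).all fun file => pvKeep qf qr file x)
      = pvProd64.filter (pvKeepB qf qr) := by
    refine List.filter_congr fun x hx => ?_
    obtain ⟨f, hf, hx'⟩ := List.mem_flatMap.mp hx
    obtain ⟨r, hr, rfl⟩ := List.mem_map.mp hx'
    rw [PySem.List.mem_pyRange_one] at hf hr
    exact pv_pred_eq qf qr f r hf.1 hf.2 hr.1 hr.2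
  rw [hfc]
  have hpw : ((pvProd64.filter (pvKeepB qf qr)).map fun p => pvSquareA p.1 p.2).Pairwise (· < ·) :=
    pv_pw64.sublist (List.filter_sublist.map _)
  rw [pv_sorted_id _ hpw]
  unfold chessQueenCoreB pvProd64
  simp only [List.filter_flatMap, List.filter_map, List.map_flatMap, List.map_map]
  rfl

-- ===== VERDICT (by name: the statement is the Claim_ definition above) =====
theorem chessQueen_spec : Claim_equal_chessQueen := by
  intro q _ _
  unfold Spec_chessQueen chessQueen chessQueen_alt
  cases PySem.Str.pyGet? q 0 with
  | none => rfl
  | some c0 =>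
    cases PySem.Str.pyGet? q (-1) with
    | none => rfl
    | some cl =>
      dsimp only
      cases PySem.Int.ofStr? (String.ofList [cl]) with
      | none => rfl
      | some n => exact pv_core_eq _ _
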